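-- pv_equiv track=rewrite | github.com/sonder-art/ia_p26_hex_tournament | estudiantes/walitos/strategy.py | _legal_from_board
-- ===== SOURCE A (Python) =====
-- _NEIGHBORS = [(-1, 0), (-1, 1), (0, -1), (0, 1), (1, -1), (1, 0)]
--
-- _NB11: list[list[list[tuple[int, int]]]] = [
--     [
--         [
--             (r + dr, c + dc)
--             for dr, dc in _NEIGHBORS
--             if 0 <= r + dr < 11 and 0 <= c + dc < 11
--         ]
--         for c in range(11)
--     ]
--     for r in range(11)
-- ]
--
-- def _get_neighbors(r: int, c: int, size: int) -> list[tuple[int, int]]: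
--     if size == 11:
--         return _NB11[r][c]
--     return [
--         (r + dr, c + dc)
--         for dr, dc in _NEIGHBORS
--         if 0 <= r + dr < size and 0 <= c + dc < size
--     ]
--
-- def _dead_cells(board, size: int) -> set:
--     dead: set = set()
--     for r in range(size):
--         for c in range(size):
--             if board[r][c] != 0:
--                 continue
--             nbs = _get_neighbors(r, c, size)
--             if not nbs:
--                 continue
--             if any(board[nr][nc] == 0 for nr, nc in nbs):
--                 continue
--             if len({board[nr][nc] for nr, nc in nbs}) == 1:
--                 dead.add((r, c))
--     return dead
--
-- def _legal_from_board(board, size: int, player: int, revealed_opponent: set) -> list: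
--     dead = _dead_cells(board, size)
--     return [
--         (r, c)
--         for r in range(size)
--         for c in range(size)
--         if board[r][c] == 0 and (r, c) not in revealed_opponent and (r, c) not in dead
--     ]
-- ===== SOURCE B (Python) =====
-- _NEIGHBORS = [(-1, 0), (-1, 1), (0, -1), (0, 1), (1, -1), (1, 0)]
--
-- def _legal_from_board(board, size: int, player: int, revealed_opponent: set) -> list:
--     # Scatter pass: every cell pushes its value to its in-bounds neighbours, so each
--     # cell ends up knowing its neighbour statistics without ever gathering them.
--     deg = {}      # (r, c) -> number of in-bounds neighbours
--     filled = {}   # (r, c) -> number of non-empty neighbours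
--     colors = {}   # (r, c) -> set of colours among non-empty neighbours
--     for r in range(size):
--         for c in range(size):
--             v = board[r][c]
--             for dr, dc in _NEIGHBORS:
--                 nr, nc = r + dr, c + dc
--                 if 0 <= nr < size and 0 <= nc < size:
--                     key = (nr, nc)
--                     deg[key] = deg.get(key, 0) + 1
--                     if v != 0:
--                         filled[key] = filled.get(key, 0) + 1
--                         colors.setdefault(key, set()).add(v)
--     legal = []
--     for r in range(size):
--         for c in range(size):
--             if board[r][c] != 0 or (r, c) in revealed_opponent:
--                 continue
--             key = (r, c)
--             d = deg.get(key, 0)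
--             if d > 0 and filled.get(key, 0) == d and len(colors[key]) == 1:
--                 continue  # dead: surrounded entirely by one colour
--             legal.append((r, c))
--     return legal
-- ===== Notes on version B (the rewrite author's own statement) =====
-- stated objective: alternative
-- what changed: A gathers: for each empty cell it collects its neighbours' values (via a precomputed 11x11 neighbour cache) and builds a dead-cell set before filtering; B scatters: one pass in which every cell pushes its value to its in-bounds neighbours, accumulating per-cell degree / filled-count / colour-set dictionaries, and a cell is then dead exactly when filled == degree > 0 with a single colour.
import Mathlib
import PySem

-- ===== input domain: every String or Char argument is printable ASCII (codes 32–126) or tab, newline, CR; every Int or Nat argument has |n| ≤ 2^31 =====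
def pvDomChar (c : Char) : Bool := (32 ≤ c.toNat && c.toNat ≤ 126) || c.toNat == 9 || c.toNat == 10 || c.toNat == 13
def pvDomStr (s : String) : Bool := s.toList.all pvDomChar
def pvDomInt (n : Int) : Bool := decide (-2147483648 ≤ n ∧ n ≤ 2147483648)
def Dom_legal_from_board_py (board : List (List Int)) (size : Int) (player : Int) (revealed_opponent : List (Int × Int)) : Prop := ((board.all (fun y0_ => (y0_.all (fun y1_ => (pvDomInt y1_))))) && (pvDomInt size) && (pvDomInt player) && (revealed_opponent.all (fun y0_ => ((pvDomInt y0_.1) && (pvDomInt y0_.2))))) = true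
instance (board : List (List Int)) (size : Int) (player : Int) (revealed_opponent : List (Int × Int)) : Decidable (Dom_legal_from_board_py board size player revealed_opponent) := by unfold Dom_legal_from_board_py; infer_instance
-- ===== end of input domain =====

-- B replaces A's gather-and-filter (dead-cell set built from each empty cell's neighbour
-- values, via an 11x11 neighbour cache) by a scatter pass: every cell pushes its value to
-- its in-bounds neighbours, accumulating degree / filled-count / colour-set dictionaries,
-- from which deadness is read off per cell (objective: alternative algorithm, same cost).

-- ===== PORT A =====
def pvNeighbors : List (Int × Int) := [(-1, 0), (-1, 1), (0, -1), (0, 1), (1, -1), (1, 0)]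

def pvNB11 : List (List (List (Int × Int))) :=
  (PySem.List.pyRange 0 11 1).map (fun r =>
    (PySem.List.pyRange 0 11 1).map (fun c =>
      pvNeighbors.filterMap (fun d =>
        if 0 ≤ r + d.1 ∧ r + d.1 < 11 ∧ 0 ≤ c + d.2 ∧ c + d.2 < 11 then
          some (r + d.1, c + d.2) else none)))

def pvGetNeighbors (r c size : Int) : List (Int × Int) :=
  if size = 11 then
    PySem.List.pyGetD (PySem.List.pyGetD pvNB11 r []) c []
  else
    pvNeighbors.filterMap (fun d =>
      if 0 ≤ r + d.1 ∧ r + d.1 < size ∧ 0 ≤ c + d.2 ∧ c + d.2 < size then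
        some (r + d.1, c + d.2) else none)

-- board[r][c]; both indices are in range on every admitted input (Pre_)
def pvCell (board : List (List Int)) (r c : Int) : Int :=
  PySem.List.pyGetD (PySem.List.pyGetD board r []) c 0

def pvDeadCells (board : List (List Int)) (size : Int) : PySem.Set (Int × Int) :=
  (PySem.List.pyRange 0 size 1).foldl (fun dead r =>
    (PySem.List.pyRange 0 size 1).foldl (fun dead c =>
      if pvCell board r c ≠ 0 then dead
      else
        let nbs := pvGetNeighbors r c size
        if nbs = [] then dead
        else if nbs.any (fun p => pvCell board p.1 p.2 == 0) then dead
        else if PySem.Set.len (PySem.Set.ofList (nbs.map (fun p => pvCell board p.1 p.2))) = 1 then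
          PySem.Set.add dead (r, c)
        else dead) dead) PySem.Set.empty

def legal_from_board_py (board : List (List Int)) (size : Int) (player : Int) (revealed_opponent : List (Int × Int)) : List (Int × Int) :=
  let dead := pvDeadCells board size
  (PySem.List.pyRange 0 size 1).foldl (fun acc r =>
    (PySem.List.pyRange 0 size 1).foldl (fun acc c =>
      if pvCell board r c = 0 ∧ (r, c) ∉ revealed_opponent ∧ (r, c) ∉ dead then
        acc ++ [(r, c)]
      else acc) acc) []

-- ===== PORT B =====
-- scatter state: (deg, filled, colors), exactly Source B's three dictionaries
abbrev pvSt : Type := PySem.Dict (Int × Int) Int × PySem.Dict (Int × Int) Int × PySem.Dict (Int × Int) (PySem.Set Int)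

-- the three dictionary updates of Source B's innermost loop body, at one target/value pair:
-- deg[key] = deg.get(key,0)+1; if v != 0: filled[key] = filled.get(key,0)+1; colors.setdefault(key,set()).add(v)
def pvPush (st : pvSt) (kv : (Int × Int) × Int) : pvSt :=
  let deg := st.1.insert kv.1 (st.1.getD kv.1 0 + 1)
  if kv.2 ≠ 0 then
    (deg, st.2.1.insert kv.1 (st.2.1.getD kv.1 0 + 1),
          st.2.2.insert kv.1 (PySem.Set.add (st.2.2.getD kv.1 PySem.Set.empty) kv.2))
  else (deg, st.2.1, st.2.2)

def legal_from_board_py_alt (board : List (List Int)) (size : Int) (player : Int) (revealed_opponent : List (Int × Int)) : List (Int × Int) :=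
  let st : pvSt :=
    (PySem.List.pyRange 0 size 1).foldl (fun st r =>
      (PySem.List.pyRange 0 size 1).foldl (fun st c =>
        pvNeighbors.foldl (fun st d =>
          if 0 ≤ r + d.1 ∧ r + d.1 < size ∧ 0 ≤ c + d.2 ∧ c + d.2 < size then
            pvPush st ((r + d.1, c + d.2), pvCell board r c)
          else st) st) st)
      (PySem.Dict.empty, PySem.Dict.empty, PySem.Dict.empty)
  (PySem.List.pyRange 0 size 1).foldl (fun acc r =>
    (PySem.List.pyRange 0 size 1).foldl (fun acc c =>
      if pvCell board r c ≠ 0 ∨ (r, c) ∈ revealed_opponent then acc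
      else if 0 < st.1.getD (r, c) 0 ∧ st.2.1.getD (r, c) 0 = st.1.getD (r, c) 0 ∧
              -- Source B reads colors[key]; the guard (filled = deg > 0) guarantees the key is
              -- present, so getD with the empty set is exact there
              PySem.Set.len (st.2.2.getD (r, c) PySem.Set.empty) = 1 then acc
      else acc ++ [(r, c)]) acc) []

-- ===== PRECONDITION & SPEC =====
-- Pre_ excludes exactly the inputs where Python A raises IndexError: a board with
-- fewer than `size` rows, or a row among the first `size` shorter than `size`.
def Pre_legal_from_board_py (board : List (List Int)) (size : Int) (player : Int) (revealed_opponent : List (Int × Int)) : Prop :=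
  size ≤ (board.length : Int) ∧ ∀ row ∈ board.take size.toNat, size ≤ (row.length : Int)
instance (board : List (List Int)) (size : Int) (player : Int) (revealed_opponent : List (Int × Int)) : Decidable (Pre_legal_from_board_py board size player revealed_opponent) := by unfold Pre_legal_from_board_py; infer_instance
def pvWitness_legal_from_board_py : List (List Int) × Int × Int × (List (Int × Int)) :=
  ([[0, 1], [1, 0]], 2, 1, [(0, 0)])
def Spec_legal_from_board_py (board : List (List Int)) (size : Int) (player : Int) (revealed_opponent : List (Int × Int)) (out : List (Int × Int)) : Prop := out = legal_from_board_py_alt board size player revealed_opponent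
instance (board : List (List Int)) (size : Int) (player : Int) (revealed_opponent : List (Int × Int)) (out : List (Int × Int)) : Decidable (Spec_legal_from_board_py board size player revealed_opponent out) := by unfold Spec_legal_from_board_py; infer_instance

-- ===== CLAIM (what is proved, stated in full; the proofs are below) =====
def Claim_equal_legal_from_board_py : Prop := ∀ (board : List (List Int)) (size : Int) (player : Int) (revealed_opponent : List (Int × Int)), Dom_legal_from_board_py board size player revealed_opponent → Pre_legal_from_board_py board size player revealed_opponent → Spec_legal_from_board_py board size player revealed_opponent (legal_from_board_py board size player revealed_opponent)

-- ===== LEMMAS AND PROOFS =====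

-- ---- A-side characterisation (gather) ----

-- for in-range cells the NB11 cache branch agrees with the direct comprehension
theorem pvGetNeighbors_eq (r c size : Int) (hr0 : 0 ≤ r) (hr1 : r < size)
    (hc0 : 0 ≤ c) (hc1 : c < size) :
    pvGetNeighbors r c size =
      pvNeighbors.filterMap (fun d =>
        if 0 ≤ r + d.1 ∧ r + d.1 < size ∧ 0 ≤ c + d.2 ∧ c + d.2 < size then
          some (r + d.1, c + d.2) else none) := by
  unfold pvGetNeighbors
  split_ifs with h
  · subst h
    unfold pvNB11
    rw [PySem.List.pyGetD_map_pyRange_of_nonneg _ 11 r _ hr0 hr1,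
        PySem.List.pyGetD_map_pyRange_of_nonneg _ 11 c _ hc0 hc1]
  · rfl

-- the list of neighbour VALUES of (r,c)
def pvNbVals (board : List (List Int)) (r c size : Int) : List Int :=
  pvNeighbors.filterMap (fun d =>
    if 0 ≤ r + d.1 ∧ r + d.1 < size ∧ 0 ≤ c + d.2 ∧ c + d.2 < size then
      some (pvCell board (r + d.1) (c + d.2)) else none)

theorem pvNbVals_eq (board : List (List Int)) (r c size : Int) :
    pvNbVals board r c size =
      (pvNeighbors.filterMap (fun d =>
        if 0 ≤ r + d.1 ∧ r + d.1 < size ∧ 0 ≤ c + d.2 ∧ c + d.2 < size then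
          some (r + d.1, c + d.2) else none)).map (fun p => pvCell board p.1 p.2) := by
  rw [List.map_filterMap]
  unfold pvNbVals
  congr 1
  funext d
  split_ifs <;> rfl

-- A's dead condition at one cell, phrased on the inputs
def pvDeadCond (board : List (List Int)) (size r c : Int) : Prop :=
  pvCell board r c = 0 ∧
  pvGetNeighbors r c size ≠ [] ∧
  ¬ ((pvGetNeighbors r c size).any (fun p => pvCell board p.1 p.2 == 0) = true) ∧
  PySem.Set.len (PySem.Set.ofList ((pvGetNeighbors r c size).map (fun p => pvCell board p.1 p.2))) = 1

theorem mem_dead_inner (board : List (List Int)) (size r : Int) (cs : List Int)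
    (dead : PySem.Set (Int × Int)) (p : Int × Int) :
    (p ∈ cs.foldl (fun dead c =>
      if pvCell board r c ≠ 0 then dead
      else
        let nbs := pvGetNeighbors r c size
        if nbs = [] then dead
        else if nbs.any (fun q => pvCell board q.1 q.2 == 0) then dead
        else if PySem.Set.len (PySem.Set.ofList (nbs.map (fun q => pvCell board q.1 q.2))) = 1 then
          PySem.Set.add dead (r, c)
        else dead) dead) ↔
    p ∈ dead ∨ ∃ c ∈ cs, pvDeadCond board size r c ∧ p = (r, c) := by
  induction cs generalizing dead with
  | nil => simp
  | cons c cs ih =>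
    simp only [List.foldl_cons, ih]
    have hstep : (p ∈ (if pvCell board r c ≠ 0 then dead
      else
        let nbs := pvGetNeighbors r c size
        if nbs = [] then dead
        else if nbs.any (fun q => pvCell board q.1 q.2 == 0) then dead
        else if PySem.Set.len (PySem.Set.ofList (nbs.map (fun q => pvCell board q.1 q.2))) = 1 then
          PySem.Set.add dead (r, c)
        else dead)) ↔ p ∈ dead ∨ (pvDeadCond board size r c ∧ p = (r, c)) := by
      simp only []
      split_ifs with h1 h2 h3 h4 <;>
        simp only [PySem.Set.mem_add, pvDeadCond] <;> tauto
    rw [hstep]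
    simp only [List.mem_cons]
    constructor
    · rintro ((h | h) | ⟨c', hc', h⟩)
      · exact Or.inl h
      · exact Or.inr ⟨c, Or.inl rfl, h⟩
      · exact Or.inr ⟨c', Or.inr hc', h⟩
    · rintro (h | ⟨c', (rfl | hc'), h⟩)
      · exact Or.inl (Or.inl h)
      · exact Or.inl (Or.inr h)
      · exact Or.inr ⟨c', hc', h⟩

theorem mem_deadCells (board : List (List Int)) (size : Int) (p : Int × Int) :
    p ∈ pvDeadCells board size ↔
    ∃ r ∈ PySem.List.pyRange 0 size 1, ∃ c ∈ PySem.List.pyRange 0 size 1,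
      pvDeadCond board size r c ∧ p = (r, c) := by
  unfold pvDeadCells
  have : ∀ (rs : List Int) (dead : PySem.Set (Int × Int)),
      (p ∈ rs.foldl (fun dead r =>
        (PySem.List.pyRange 0 size 1).foldl (fun dead c =>
          if pvCell board r c ≠ 0 then dead
          else
            let nbs := pvGetNeighbors r c size
            if nbs = [] then dead
            else if nbs.any (fun q => pvCell board q.1 q.2 == 0) then dead
            else if PySem.Set.len (PySem.Set.ofList (nbs.map (fun q => pvCell board q.1 q.2))) = 1 then
              PySem.Set.add dead (r, c)
            else dead) dead) dead) ↔
      p ∈ dead ∨ ∃ r ∈ rs, ∃ c ∈ PySem.List.pyRange 0 size 1,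
        pvDeadCond board size r c ∧ p = (r, c) := by
    intro rs
    induction rs with
    | nil => intro dead; simp
    | cons r rs ih =>
      intro dead
      simp only [List.foldl_cons, ih, mem_dead_inner]
      simp only [List.mem_cons]
      constructor
      · rintro ((h | h) | ⟨r', hr', h⟩)
        · exact Or.inl h
        · obtain ⟨c, hc, h⟩ := h
          exact Or.inr ⟨r, Or.inl rfl, c, hc, h⟩
        · exact Or.inr ⟨r', Or.inr hr', h⟩
      · rintro (h | ⟨r', (rfl | hr'), h⟩)
        · exact Or.inl (Or.inl h)
        · exact Or.inl (Or.inr h)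
        · exact Or.inr ⟨r', hr', h⟩
  rw [this]
  simp [PySem.Set.empty]

theorem deadCond_iff (board : List (List Int)) (size r c : Int)
    (hr0 : 0 ≤ r) (hr1 : r < size) (hc0 : 0 ≤ c) (hc1 : c < size)
    (h0 : pvCell board r c = 0) :
    pvDeadCond board size r c ↔
      (pvNbVals board r c size ≠ [] ∧ (0 : Int) ∉ pvNbVals board r c size ∧
        PySem.Set.len (PySem.Set.ofList (pvNbVals board r c size)) = 1) := by
  unfold pvDeadCond
  rw [pvNbVals_eq, pvGetNeighbors_eq r c size hr0 hr1 hc0 hc1]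
  simp only [h0, true_and, ne_eq, List.map_eq_nil_iff, List.any_eq_true, List.mem_map,
    beq_iff_eq, not_exists, not_and]

-- ---- B-side characterisation (scatter) ----

-- all cells of the scan, in execution order, and all pushes (target, value)
def pvCellsL (size : Int) : List (Int × Int) :=
  (PySem.List.pyRange 0 size 1).flatMap (fun r =>
    (PySem.List.pyRange 0 size 1).map (fun c => (r, c)))

def pvPushes (board : List (List Int)) (size : Int) : List ((Int × Int) × Int) :=
  (pvCellsL size).flatMap (fun rc =>
    pvNeighbors.filterMap (fun d =>
      if 0 ≤ rc.1 + d.1 ∧ rc.1 + d.1 < size ∧ 0 ≤ rc.2 + d.2 ∧ rc.2 + d.2 < size then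
        some ((rc.1 + d.1, rc.2 + d.2), pvCell board rc.1 rc.2) else none))

theorem foldl_filterMap_if {α β σ : Type} (l : List α) (p : α → Prop) [DecidablePred p]
    (f : α → β) (g : σ → β → σ) (s : σ) :
    (l.filterMap (fun a => if p a then some (f a) else none)).foldl g s
      = l.foldl (fun s a => if p a then g s (f a) else s) s := by
  induction l generalizing s with
  | nil => rfl
  | cons a l ih =>
    by_cases h : p a <;> simp [h, ih]

-- the nested scatter loop of the port is the fold of pvPush over pvPushes
theorem scatter_eq (board : List (List Int)) (size : Int) :
    ((PySem.List.pyRange 0 size 1).foldl (fun st r =>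
      (PySem.List.pyRange 0 size 1).foldl (fun st c =>
        pvNeighbors.foldl (fun st d =>
          if 0 ≤ r + d.1 ∧ r + d.1 < size ∧ 0 ≤ c + d.2 ∧ c + d.2 < size then
            pvPush st ((r + d.1, c + d.2), pvCell board r c)
          else st) st) st)
      ((PySem.Dict.empty, PySem.Dict.empty, PySem.Dict.empty) : pvSt))
    = (pvPushes board size).foldl pvPush (PySem.Dict.empty, PySem.Dict.empty, PySem.Dict.empty) := by
  unfold pvPushes pvCellsL
  rw [List.foldl_flatMap, List.foldl_flatMap]
  apply PySem.List.foldl_congr_mem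
  intro st r _
  rw [List.foldl_map]
  apply PySem.List.foldl_congr_mem
  intro st c _
  dsimp only
  rw [foldl_filterMap_if]

-- effect of one push on each statistic
theorem pvPush_deg (st : pvSt) (q : (Int × Int) × Int) (k : Int × Int) :
    (pvPush st q).1.getD k 0 = st.1.getD k 0 + if q.1 = k then 1 else 0 := by
  by_cases hq : q.2 = 0 <;> by_cases hk : k = q.1 <;>
    simp [pvPush, hq, hk, PySem.Dict.getD_insert, eq_comm]

theorem pvPush_filled (st : pvSt) (q : (Int × Int) × Int) (k : Int × Int) :
    (pvPush st q).2.1.getD k 0 = st.2.1.getD k 0 + if q.1 = k ∧ q.2 ≠ 0 then 1 else 0 := by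
  by_cases hq : q.2 = 0 <;> by_cases hk : k = q.1 <;>
    simp [pvPush, hq, hk, PySem.Dict.getD_insert, eq_comm]

theorem pvPush_colors_mem (st : pvSt) (q : (Int × Int) × Int) (k : Int × Int) (x : Int) :
    (x ∈ (pvPush st q).2.2.getD k PySem.Set.empty) ↔
      x ∈ st.2.2.getD k PySem.Set.empty ∨ (q.1 = k ∧ q.2 = x ∧ q.2 ≠ 0) := by
  by_cases hq : q.2 = 0 <;> by_cases hk : k = q.1 <;>
    simp [pvPush, hq, hk, PySem.Dict.getD_insert, PySem.Set.mem_add, eq_comm] <;>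
    tauto

theorem pvPush_colors_nodup (st : pvSt) (q : (Int × Int) × Int)
    (h : ∀ k, (st.2.2.getD k PySem.Set.empty).Nodup) :
    ∀ k, ((pvPush st q).2.2.getD k PySem.Set.empty).Nodup := by
  intro k
  unfold pvPush
  by_cases hq : q.2 ≠ 0
  · rw [if_pos hq]
    dsimp only
    rw [PySem.Dict.getD_insert]
    by_cases hk : k = q.1
    · rw [if_pos hk]
      exact PySem.Set.nodup_add _ _ (h q.1)
    · rw [if_neg hk]
      exact h k
  · rw [if_neg hq]
    exact h k

-- statistics of the fold over an arbitrary push list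
theorem foldPush_deg (L : List ((Int × Int) × Int)) (st : pvSt) (k : Int × Int) :
    ((L.foldl pvPush st).1).getD k 0
      = st.1.getD k 0 + (L.countP (fun p => p.1 == k) : Int) := by
  induction L generalizing st with
  | nil => simp
  | cons q L ih =>
    rw [List.foldl_cons, ih, pvPush_deg, List.countP_cons]
    by_cases h : q.1 = k <;> simp [h] <;> push_cast <;> ring

theorem foldPush_filled (L : List ((Int × Int) × Int)) (st : pvSt) (k : Int × Int) :
    ((L.foldl pvPush st).2.1).getD k 0
      = st.2.1.getD k 0 + (L.countP (fun p => p.1 == k && p.2 != 0) : Int) := by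
  induction L generalizing st with
  | nil => simp
  | cons q L ih =>
    rw [List.foldl_cons, ih, pvPush_filled, List.countP_cons]
    by_cases h1 : q.1 = k <;> by_cases h2 : q.2 = 0 <;>
      simp [h1, h2] <;> push_cast <;> ring

theorem foldPush_colors_mem (L : List ((Int × Int) × Int)) (st : pvSt) (k : Int × Int) (x : Int) :
    (x ∈ ((L.foldl pvPush st).2.2).getD k PySem.Set.empty) ↔
      x ∈ st.2.2.getD k PySem.Set.empty ∨ ∃ p ∈ L, p.1 = k ∧ p.2 = x ∧ p.2 ≠ 0 := by
  induction L generalizing st with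
  | nil => simp
  | cons q L ih =>
    rw [List.foldl_cons, ih, pvPush_colors_mem]
    simp only [List.mem_cons]
    constructor
    · rintro ((h | h) | ⟨p, hp, h⟩)
      · exact Or.inl h
      · exact Or.inr ⟨q, Or.inl rfl, h⟩
      · exact Or.inr ⟨p, Or.inr hp, h⟩
    · rintro (h | ⟨p, (rfl | hp), h⟩)
      · exact Or.inl (Or.inl h)
      · exact Or.inl (Or.inr h)
      · exact Or.inr ⟨p, hp, h⟩

theorem foldPush_colors_nodup (L : List ((Int × Int) × Int)) (st : pvSt)
    (h : ∀ k, (st.2.2.getD k PySem.Set.empty).Nodup) :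
    ∀ k, (((L.foldl pvPush st).2.2).getD k PySem.Set.empty).Nodup := by
  induction L generalizing st with
  | nil => exact h
  | cons q L ih => exact ih _ (pvPush_colors_nodup st q h)

-- counting helpers
theorem sum_map_ite_one (l : List (Int × Int)) (p : (Int × Int) → Bool) :
    (l.map (fun a => if p a then 1 else 0)).sum = l.countP p := by
  induction l with
  | nil => rfl
  | cons a l ih =>
    by_cases h : p a <;> simp [h, ih, List.countP_cons, Nat.add_comm]

theorem sum_map_add_nat (B : List (Int × Int)) (f g : (Int × Int) → Nat) :
    (B.map (fun b => f b + g b)).sum = (B.map f).sum + (B.map g).sum := by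
  induction B with
  | nil => rfl
  | cons b B ih => simp only [List.map_cons, List.sum_cons, ih]; omega

theorem sum_countP_swap (A : List (Int × Int)) (B : List (Int × Int))
    (p : (Int × Int) → (Int × Int) → Bool) :
    (A.map (fun a => B.countP (fun b => p a b))).sum
      = (B.map (fun b => A.countP (fun a => p a b))).sum := by
  induction A with
  | nil => simp
  | cons a A ih =>
    simp only [List.map_cons, List.sum_cons, ih, List.countP_cons]
    rw [sum_map_add_nat B (fun b => A.countP (fun a' => p a' b)) (fun b => if p a b then 1 else 0),
        sum_map_ite_one]
    have heta : List.countP (p a) B = List.countP (fun b => p a b) B := rfl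
    omega

theorem countP_beq_nodup {α : Type} [DecidableEq α] [BEq α] [LawfulBEq α]
    (l : List α) (h : l.Nodup) (x : α) :
    l.countP (fun a => a == x) = if x ∈ l then 1 else 0 := by
  have hc : l.countP (fun a => a == x) = l.count x := by simp [List.count_eq_countP]
  rw [hc]
  split_ifs with hm
  · exact List.count_eq_one_of_mem h hm
  · simp [List.count_eq_zero_of_not_mem hm]

theorem sum_map_if_eq (l : List Int) (hl : l.Nodup) (a : Int) (K : Nat) :
    (l.map (fun x => if x = a then K else 0)).sum = if a ∈ l then K else 0 := by
  induction l with
  | nil => simp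
  | cons x l ih =>
    rcases List.nodup_cons.1 hl with ⟨hx, hl'⟩
    by_cases h : x = a
    · subst h
      rw [List.map_cons, List.sum_cons, if_pos rfl, if_pos (by simp)]
      have hz : (l.map (fun y => if y = x then K else 0)).sum = 0 := by
        apply List.sum_eq_zero
        intro y hy
        rcases List.mem_map.1 hy with ⟨z, hz, rfl⟩
        simp [ne_of_mem_of_not_mem hz hx]
      omega
    · have hax : ¬a = x := fun hh => h hh.symm
      rw [List.map_cons, List.sum_cons, if_neg h, ih hl', Nat.zero_add]
      by_cases hm : a ∈ l
      · rw [if_pos hm, if_pos (by simp [hm])]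
      · rw [if_neg hm, if_neg (by simp [hm, hax])]

-- the number of cells equal to a fixed pair
theorem cellsL_countP (size : Int) (e : Int × Int) :
    (pvCellsL size).countP (fun rc => rc == e)
      = if 0 ≤ e.1 ∧ e.1 < size ∧ 0 ≤ e.2 ∧ e.2 < size then 1 else 0 := by
  unfold pvCellsL
  rw [List.countP_flatMap]
  have hinner : ∀ r ∈ PySem.List.pyRange 0 size 1,
      (List.countP (fun rc => rc == e) ∘ (fun r => (PySem.List.pyRange 0 size 1).map (fun c => (r, c)))) r
        = if r = e.1 then (if 0 ≤ e.2 ∧ e.2 < size then 1 else 0) else 0 := by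
    intro r _
    simp only [Function.comp]
    rw [List.countP_map]
    by_cases h : r = e.1
    · rw [if_pos h]
      have hcong : ∀ c ∈ PySem.List.pyRange 0 size 1,
          (((fun rc => rc == e) ∘ fun c => (r, c)) c) = (fun c : Int => c == e.2) c := by
        intro c _
        rcases e with ⟨e1, e2⟩
        dsimp only at h
        simp only [Function.comp]
        by_cases hc : c = e2
        · simp [h, hc]
        · simp [Prod.ext_iff, hc]
      rw [List.countP_congr (fun x hx => by rw [hcong x hx]),
          countP_beq_nodup _ (PySem.List.nodup_pyRange_one 0 size) e.2]
      by_cases hm : 0 ≤ e.2 ∧ e.2 < size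
      · rw [if_pos hm, if_pos (PySem.List.mem_pyRange_one.2 hm)]
      · rw [if_neg hm, if_neg (fun hc => hm (PySem.List.mem_pyRange_one.1 hc))]
    · rw [if_neg h, List.countP_eq_zero.2]
      intro c _
      rcases e with ⟨e1, e2⟩
      simp only [Function.comp, beq_iff_eq, Prod.mk.injEq]
      exact fun hh => absurd hh.1 h
  rw [List.map_congr_left hinner,
      sum_map_if_eq _ (PySem.List.nodup_pyRange_one 0 size) e.1]
  by_cases h1 : e.1 ∈ PySem.List.pyRange 0 size 1
  · rw [if_pos h1]
    have := PySem.List.mem_pyRange_one.1 h1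
    by_cases h2 : 0 ≤ e.2 ∧ e.2 < size
    · rw [if_pos h2, if_pos ⟨this.1, this.2, h2.1, h2.2⟩]
    · rw [if_neg h2, if_neg (fun hh => h2 ⟨hh.2.2.1, hh.2.2.2⟩)]
  · rw [if_neg h1, if_neg]
    intro hh
    exact h1 (PySem.List.mem_pyRange_one.2 ⟨hh.1, hh.2.1⟩)

-- direction-negation symmetry of the neighbour list
theorem pvNeighbors_neg_rev :
    pvNeighbors.map (fun d => (-d.1, -d.2)) = pvNeighbors.reverse := by decide

theorem countP_neighbors_neg (P : (Int × Int) → Bool) :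
    pvNeighbors.countP (fun d => P (-d.1, -d.2)) = pvNeighbors.countP P := by
  have h := List.countP_map (p := P) (f := fun d : Int × Int => (-d.1, -d.2)) (l := pvNeighbors)
  rw [pvNeighbors_neg_rev, List.countP_reverse] at h
  simpa [Function.comp] using h.symm

theorem mem_neighbors_neg (d : Int × Int) :
    ((-d.1, -d.2) : Int × Int) ∈ pvNeighbors ↔ d ∈ pvNeighbors := by
  rw [← List.mem_reverse, ← pvNeighbors_neg_rev, List.mem_map]
  constructor
  · rintro ⟨e, he, heq⟩
    have h1 : e.1 = d.1 := by
      have := congrArg Prod.fst heq; dsimp at this; omega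
    have h2 : e.2 = d.2 := by
      have := congrArg Prod.snd heq; dsimp at this; omega
    have : e = d := Prod.ext h1 h2
    rwa [← this]
  · intro h
    exact ⟨d, h, rfl⟩

-- countP of the push list at an in-range key, with a value filter
theorem pushes_countP (board : List (List Int)) (size : Int) (k : Int × Int)
    (hk : 0 ≤ k.1 ∧ k.1 < size ∧ 0 ≤ k.2 ∧ k.2 < size) (val : Int → Bool) :
    (pvPushes board size).countP (fun p => p.1 == k && val p.2)
      = (pvNbVals board k.1 k.2 size).countP val := by
  unfold pvPushes
  rw [List.countP_flatMap]
  have hcell : ∀ rc ∈ pvCellsL size,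
      (List.countP (fun p => p.1 == k && val p.2) ∘ (fun rc =>
        pvNeighbors.filterMap (fun d =>
          if 0 ≤ rc.1 + d.1 ∧ rc.1 + d.1 < size ∧ 0 ≤ rc.2 + d.2 ∧ rc.2 + d.2 < size then
            some ((rc.1 + d.1, rc.2 + d.2), pvCell board rc.1 rc.2) else none))) rc
        = pvNeighbors.countP (fun d => rc == (k.1 - d.1, k.2 - d.2) && val (pvCell board rc.1 rc.2)) := by
    intro rc _
    simp only [Function.comp]
    rw [List.countP_filterMap]
    apply List.countP_congr
    intro d _
    by_cases hb : 0 ≤ rc.1 + d.1 ∧ rc.1 + d.1 < size ∧ 0 ≤ rc.2 + d.2 ∧ rc.2 + d.2 < size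
    · rw [if_pos hb]
      simp only [Option.map_some, Option.getD_some]
      by_cases he : rc = (k.1 - d.1, k.2 - d.2)
      · have : ((rc.1 + d.1, rc.2 + d.2) : Int × Int) = k := by
          rw [he]; exact Prod.ext (by dsimp; ring) (by dsimp; ring)
        simp [he]
      · have : ((rc.1 + d.1, rc.2 + d.2) : Int × Int) ≠ k := by
          intro hc
          apply he
          have h1 := congrArg Prod.fst hc
          have h2 := congrArg Prod.snd hc
          dsimp at h1 h2
          exact Prod.ext (by omega) (by omega)
        simp [he, this]
    · rw [if_neg hb]
      simp only [Option.map_none, Option.getD_none]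
      by_cases he : rc = (k.1 - d.1, k.2 - d.2)
      · exfalso
        apply hb
        rw [he]
        dsimp
        refine ⟨by omega, by omega, by omega, by omega⟩
      · simp [he]
  rw [List.map_congr_left hcell, sum_countP_swap]
  have hdir : ∀ d ∈ pvNeighbors,
      (fun d => (pvCellsL size).countP (fun rc => rc == (k.1 - d.1, k.2 - d.2) && val (pvCell board rc.1 rc.2))) d
        = (fun d => if (0 ≤ k.1 - d.1 ∧ k.1 - d.1 < size ∧ 0 ≤ k.2 - d.2 ∧ k.2 - d.2 < size) ∧
              val (pvCell board (k.1 - d.1) (k.2 - d.2)) = true then 1 else 0) d := by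
    intro d _
    dsimp only
    by_cases hv : val (pvCell board (k.1 - d.1) (k.2 - d.2)) = true
    · have hcong : ∀ rc ∈ pvCellsL size,
          (rc == (k.1 - d.1, k.2 - d.2) && val (pvCell board rc.1 rc.2))
            = (rc == ((k.1 - d.1, k.2 - d.2) : Int × Int)) := by
        intro rc _
        by_cases he : rc = (k.1 - d.1, k.2 - d.2)
        · subst he; simp [hv]
        · simp [he]
      rw [List.countP_congr (fun x hx => by rw [hcong x hx]), cellsL_countP]
      dsimp only
      by_cases hb : 0 ≤ k.1 - d.1 ∧ k.1 - d.1 < size ∧ 0 ≤ k.2 - d.2 ∧ k.2 - d.2 < size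
      · rw [if_pos hb, if_pos ⟨hb, hv⟩]
      · rw [if_neg hb, if_neg (fun hh => hb hh.1)]
    · rw [List.countP_eq_zero.2, if_neg (fun hh => hv hh.2)]
      intro rc _
      by_cases he : rc = (k.1 - d.1, k.2 - d.2)
      · subst he; simp [hv]
      · simp [he]
  rw [List.map_congr_left hdir]
  have := sum_map_ite_one pvNeighbors (fun d =>
    decide ((0 ≤ k.1 - d.1 ∧ k.1 - d.1 < size ∧ 0 ≤ k.2 - d.2 ∧ k.2 - d.2 < size) ∧
      val (pvCell board (k.1 - d.1) (k.2 - d.2)) = true))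
  simp only [decide_eq_true_eq] at this
  rw [this]
  have hneg := countP_neighbors_neg (fun d =>
    decide ((0 ≤ k.1 + d.1 ∧ k.1 + d.1 < size ∧ 0 ≤ k.2 + d.2 ∧ k.2 + d.2 < size) ∧
      val (pvCell board (k.1 + d.1) (k.2 + d.2)) = true))
  have hrw : (fun d : Int × Int =>
      decide ((0 ≤ k.1 + (-d.1) ∧ k.1 + (-d.1) < size ∧ 0 ≤ k.2 + (-d.2) ∧ k.2 + (-d.2) < size) ∧
        val (pvCell board (k.1 + (-d.1)) (k.2 + (-d.2))) = true))
      = (fun d : Int × Int =>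
      decide ((0 ≤ k.1 - d.1 ∧ k.1 - d.1 < size ∧ 0 ≤ k.2 - d.2 ∧ k.2 - d.2 < size) ∧
        val (pvCell board (k.1 - d.1) (k.2 - d.2)) = true)) := by
    funext d
    congr 1
  rw [hrw] at hneg
  rw [hneg]
  -- now equal to countP over pvNbVals
  unfold pvNbVals
  rw [List.countP_filterMap]
  apply List.countP_congr
  intro d _
  by_cases hb : 0 ≤ k.1 + d.1 ∧ k.1 + d.1 < size ∧ 0 ≤ k.2 + d.2 ∧ k.2 + d.2 < size
  · simp [hb]
  · simp [hb]

-- membership in the colour statistics at an in-range key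
theorem pushes_mem (board : List (List Int)) (size : Int) (k : Int × Int)
    (hk : 0 ≤ k.1 ∧ k.1 < size ∧ 0 ≤ k.2 ∧ k.2 < size) (x : Int) :
    (∃ p ∈ pvPushes board size, p.1 = k ∧ p.2 = x ∧ p.2 ≠ 0)
      ↔ x ∈ pvNbVals board k.1 k.2 size ∧ x ≠ 0 := by
  unfold pvPushes pvNbVals
  constructor
  · rintro ⟨p, hp, hk1, hx, hnz⟩
    subst hx
    rcases List.mem_flatMap.1 hp with ⟨rc, hrc, hmem⟩
    rcases List.mem_filterMap.1 hmem with ⟨d, hd, hopt⟩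
    by_cases hb : 0 ≤ rc.1 + d.1 ∧ rc.1 + d.1 < size ∧ 0 ≤ rc.2 + d.2 ∧ rc.2 + d.2 < size
    · rw [if_pos hb] at hopt
      have hpe := Option.some.inj hopt
      have htar : ((rc.1 + d.1, rc.2 + d.2) : Int × Int) = k := by
        rw [← hk1, ← hpe]
      have hval : pvCell board rc.1 rc.2 = p.2 := by
        rw [← hpe]
      have h1 := congrArg Prod.fst htar
      have h2 := congrArg Prod.snd htar
      dsimp at h1 h2
      refine ⟨?_, hnz⟩
      apply List.mem_filterMap.2
      refine ⟨(-d.1, -d.2), (mem_neighbors_neg d).2 hd, ?_⟩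
      have hb' : 0 ≤ k.1 + -d.1 ∧ k.1 + -d.1 < size ∧ 0 ≤ k.2 + -d.2 ∧ k.2 + -d.2 < size := by
        have hrc := List.mem_flatMap.1 hrc
        rcases hrc with ⟨r, hr, hcmem⟩
        rcases List.mem_map.1 hcmem with ⟨c, hc, hrceq⟩
        have hr' := PySem.List.mem_pyRange_one.1 hr
        have hc' := PySem.List.mem_pyRange_one.1 hc
        have e1 : rc.1 = r := by rw [← hrceq]
        have e2 : rc.2 = c := by rw [← hrceq]
        constructor
        · omega
        constructor
        · omega
        constructor
        · omega
        · omega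
      rw [if_pos hb']
      congr 1
      have e1 : k.1 + -d.1 = rc.1 := by omega
      have e2 : k.2 + -d.2 = rc.2 := by omega
      rw [e1, e2, hval]
    · rw [if_neg hb] at hopt
      exact absurd hopt (by simp)
  · rintro ⟨hx, hnz⟩
    rcases List.mem_filterMap.1 hx with ⟨d, hd, hopt⟩
    by_cases hb : 0 ≤ k.1 + d.1 ∧ k.1 + d.1 < size ∧ 0 ≤ k.2 + d.2 ∧ k.2 + d.2 < size
    · rw [if_pos hb] at hopt
      have hval : pvCell board (k.1 + d.1) (k.2 + d.2) = x := Option.some.inj hopt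
      refine ⟨((k.1, k.2), x), ?_, rfl, rfl, hnz⟩
      apply List.mem_flatMap.2
      refine ⟨(k.1 + d.1, k.2 + d.2), ?_, ?_⟩
      · unfold pvCellsL
        apply List.mem_flatMap.2
        refine ⟨k.1 + d.1, PySem.List.mem_pyRange_one.2 ⟨hb.1, hb.2.1⟩, ?_⟩
        apply List.mem_map.2
        exact ⟨k.2 + d.2, PySem.List.mem_pyRange_one.2 ⟨hb.2.2.1, hb.2.2.2⟩, rfl⟩
      · apply List.mem_filterMap.2
        refine ⟨(-d.1, -d.2), (mem_neighbors_neg d).2 hd, ?_⟩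
        have hb' : 0 ≤ (k.1 + d.1) + -d.1 ∧ (k.1 + d.1) + -d.1 < size ∧
            0 ≤ (k.2 + d.2) + -d.2 ∧ (k.2 + d.2) + -d.2 < size := by
          dsimp
          refine ⟨by omega, by omega, by omega, by omega⟩
        rw [if_pos hb']
        dsimp
        have e1 : k.1 + d.1 + -d.1 = k.1 := by ring
        have e2 : k.2 + d.2 + -d.2 = k.2 := by ring
        rw [e1, e2, hval]
    · rw [if_neg hb] at hopt
      exact absurd hopt (by simp)

-- the scatter state at an in-range empty-or-not cell
def pvScatterSt (board : List (List Int)) (size : Int) : pvSt :=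
  (pvPushes board size).foldl pvPush (PySem.Dict.empty, PySem.Dict.empty, PySem.Dict.empty)

theorem scatter_deg (board : List (List Int)) (size : Int) (k : Int × Int)
    (hk : 0 ≤ k.1 ∧ k.1 < size ∧ 0 ≤ k.2 ∧ k.2 < size) :
    (pvScatterSt board size).1.getD k 0 = ((pvNbVals board k.1 k.2 size).length : Int) := by
  unfold pvScatterSt
  rw [foldPush_deg]
  have h0 : (PySem.Dict.empty : PySem.Dict (Int × Int) Int).getD k 0 = 0 := by
    simp [PySem.Dict.getD_empty]
  rw [h0, zero_add]
  have := pushes_countP board size k hk (fun _ => true)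
  simp only [Bool.and_true, List.countP_true] at this
  rw [this]

theorem scatter_filled (board : List (List Int)) (size : Int) (k : Int × Int)
    (hk : 0 ≤ k.1 ∧ k.1 < size ∧ 0 ≤ k.2 ∧ k.2 < size) :
    (pvScatterSt board size).2.1.getD k 0
      = (((pvNbVals board k.1 k.2 size).countP (fun v => v != 0)) : Int) := by
  unfold pvScatterSt
  rw [foldPush_filled]
  have h0 : (PySem.Dict.empty : PySem.Dict (Int × Int) Int).getD k 0 = 0 := by
    simp [PySem.Dict.getD_empty]
  rw [h0, zero_add, pushes_countP board size k hk (fun v => v != 0)]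

theorem scatter_colors_mem (board : List (List Int)) (size : Int) (k : Int × Int)
    (hk : 0 ≤ k.1 ∧ k.1 < size ∧ 0 ≤ k.2 ∧ k.2 < size) (x : Int) :
    (x ∈ (pvScatterSt board size).2.2.getD k PySem.Set.empty)
      ↔ x ∈ pvNbVals board k.1 k.2 size ∧ x ≠ 0 := by
  unfold pvScatterSt
  rw [foldPush_colors_mem]
  have h0 : (PySem.Dict.empty : PySem.Dict (Int × Int) (PySem.Set Int)).getD k PySem.Set.empty
      = PySem.Set.empty := by
    simp [PySem.Dict.getD_empty]
  rw [h0]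
  have : ¬ (x ∈ (PySem.Set.empty : PySem.Set Int)) := by simp [PySem.Set.empty]
  simp only [this, false_or]
  exact pushes_mem board size k hk x

theorem scatter_colors_nodup (board : List (List Int)) (size : Int) (k : Int × Int) :
    ((pvScatterSt board size).2.2.getD k PySem.Set.empty).Nodup := by
  unfold pvScatterSt
  apply foldPush_colors_nodup
  intro k'
  have h0 : (PySem.Dict.empty : PySem.Dict (Int × Int) (PySem.Set Int)).getD k' PySem.Set.empty
      = PySem.Set.empty := by
    simp [PySem.Dict.getD_empty]
  rw [h0]
  exact List.nodup_nil

-- B's inline dead test agrees with A's gather-based dead condition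
theorem bguard_iff (board : List (List Int)) (size : Int) (r c : Int)
    (hr0 : 0 ≤ r) (hr1 : r < size) (hc0 : 0 ≤ c) (hc1 : c < size) :
    (0 < (pvScatterSt board size).1.getD (r, c) 0 ∧
      (pvScatterSt board size).2.1.getD (r, c) 0 = (pvScatterSt board size).1.getD (r, c) 0 ∧
      PySem.Set.len ((pvScatterSt board size).2.2.getD (r, c) PySem.Set.empty) = 1)
    ↔ (pvNbVals board r c size ≠ [] ∧ (0 : Int) ∉ pvNbVals board r c size ∧
        PySem.Set.len (PySem.Set.ofList (pvNbVals board r c size)) = 1) := by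
  have hk : 0 ≤ (r, c).1 ∧ (r, c).1 < size ∧ 0 ≤ (r, c).2 ∧ (r, c).2 < size :=
    ⟨hr0, hr1, hc0, hc1⟩
  have hdeg := scatter_deg board size (r, c) hk
  have hfill := scatter_filled board size (r, c) hk
  set vals := pvNbVals board (r, c).1 (r, c).2 size with hvals
  have h1 : (0 < (pvScatterSt board size).1.getD (r, c) 0) ↔ vals ≠ [] := by
    rw [hdeg]
    constructor
    · intro h hnil
      rw [hnil] at h
      simp at h
    · intro h
      have : 0 < vals.length := List.length_pos_iff.2 h
      exact_mod_cast this
  have h2 : ((pvScatterSt board size).2.1.getD (r, c) 0 = (pvScatterSt board size).1.getD (r, c) 0)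
      ↔ ((0 : Int) ∉ vals) := by
    rw [hdeg, hfill]
    rw [Int.natCast_inj]
    rw [List.countP_eq_length]
    constructor
    · intro h hmem
      have := h 0 hmem
      simp at this
    · intro h v hv
      simp only [bne_iff_ne, ne_eq]
      intro hv0
      rw [hv0] at hv
      exact h hv
  constructor
  · rintro ⟨ha, hb, hc'⟩
    have hnn := h2.1 hb
    refine ⟨h1.1 ha, hnn, ?_⟩
    -- same members, both nodup ⇒ same length
    have hmemiff : ∀ x, x ∈ (pvScatterSt board size).2.2.getD (r, c) PySem.Set.empty ↔
        x ∈ PySem.Set.ofList vals := by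
      intro x
      rw [scatter_colors_mem board size (r, c) hk x, PySem.Set.mem_ofList]
      constructor
      · rintro ⟨hx, -⟩; exact hx
      · intro hx
        refine ⟨hx, ?_⟩
        intro h0'
        rw [h0'] at hx
        exact hnn hx
    have hperm := (List.perm_ext_iff_of_nodup (scatter_colors_nodup board size (r, c))
      (PySem.Set.nodup_ofList vals)).2 hmemiff
    have hlen' : PySem.Set.len ((pvScatterSt board size).2.2.getD (r, c) PySem.Set.empty)
        = PySem.Set.len (PySem.Set.ofList vals) := by
      simpa [PySem.Set.len] using hperm.length_eq
    rw [← hlen']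
    exact hc'
  · rintro ⟨ha, hnn, hc'⟩
    refine ⟨h1.2 ha, h2.2 hnn, ?_⟩
    have hmemiff : ∀ x, x ∈ (pvScatterSt board size).2.2.getD (r, c) PySem.Set.empty ↔
        x ∈ PySem.Set.ofList vals := by
      intro x
      rw [scatter_colors_mem board size (r, c) hk x, PySem.Set.mem_ofList]
      constructor
      · rintro ⟨hx, -⟩; exact hx
      · intro hx
        refine ⟨hx, ?_⟩
        intro h0'
        rw [h0'] at hx
        exact hnn hx
    have hperm := (List.perm_ext_iff_of_nodup (scatter_colors_nodup board size (r, c))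
      (PySem.Set.nodup_ofList vals)).2 hmemiff
    have hlen' : PySem.Set.len ((pvScatterSt board size).2.2.getD (r, c) PySem.Set.empty)
        = PySem.Set.len (PySem.Set.ofList vals) := by
      simpa [PySem.Set.len] using hperm.length_eq
    rw [hlen']
    exact hc'

-- ===== VERDICT proof =====
set_option maxHeartbeats 1000000 in
theorem legal_from_board_py_spec : Claim_equal_legal_from_board_py := by
  intro board size player revealed _ _
  unfold Spec_legal_from_board_py legal_from_board_py legal_from_board_py_alt
  simp only []
  rw [scatter_eq]
  apply PySem.List.foldl_congr_mem
  intro acc r hr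
  apply PySem.List.foldl_congr_mem
  intro acc2 c hc
  rw [PySem.List.mem_pyRange_one] at hr hc
  have hdead : ((r, c) ∈ pvDeadCells board size) ↔ pvDeadCond board size r c := by
    rw [mem_deadCells]
    constructor
    · rintro ⟨r', -, c', -, h, heq⟩
      injection heq with h1 h2
      subst h1; subst h2; exact h
    · intro h
      exact ⟨r, PySem.List.mem_pyRange_one.2 hr, c, PySem.List.mem_pyRange_one.2 hc, h, rfl⟩
  by_cases h0 : pvCell board r c = 0
  · have hA : ((r, c) ∈ pvDeadCells board size) ↔
        (pvNbVals board r c size ≠ [] ∧ (0 : Int) ∉ pvNbVals board r c size ∧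
          PySem.Set.len (PySem.Set.ofList (pvNbVals board r c size)) = 1) := by
      rw [hdead, deadCond_iff board size r c hr.1 hr.2 hc.1 hc.2 h0]
    have hB := bguard_iff board size r c hr.1 hr.2 hc.1 hc.2
    have hS : (pvPushes board size).foldl pvPush
        ((PySem.Dict.empty, PySem.Dict.empty, PySem.Dict.empty) : pvSt) = pvScatterSt board size := rfl
    rw [hS]
    split_ifs with g1 g2 g3 g4 g5
    · exfalso
      rcases g2 with h | h
      · exact h g1.1
      · exact g1.2.1 h
    · exfalso
      exact g1.2.2 (hA.2 (hB.1 g3))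
    · rfl
    · rfl
    · rfl
    · exfalso
      rcases not_or.1 g4 with ⟨hcell, hrev⟩
      have hdm : (r, c) ∈ pvDeadCells board size := by
        by_contra hnd
        exact g1 ⟨h0, hrev, hnd⟩
      exact g5 (hB.2 (hA.1 hdm))
  · split_ifs with g1 g2 g3 g4 g5
    · exact absurd g1.1 h0
    · exact absurd g1.1 h0
    · rfl
    · rfl
    · rfl
    · exact absurd (not_not.1 (not_or.1 g4).1) h0
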